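-- pv_equiv track=rewrite | github.com/cocoindex-io/cocoindex | examples/benchmark_py_vs_rs/common.py | slugify_heading
-- ===== SOURCE A (Python) =====
-- def slugify_heading(value: str) -> str:
--     parts: list[str] = []
--     current: list[str] = []
--     for ch in value.lower():
--         if ch.isalnum():
--             current.append(ch)
--         elif current:
--             parts.append("".join(current))
--             current.clear()
--     if current:
--         parts.append("".join(current))
--     return "-".join(parts) if parts else "section"
-- ===== SOURCE B (Python) =====
-- def slugify_heading(value: str) -> str:
--     s = "".join(ch if ch.isalnum() else " " for ch in value.lower())
--     parts = s.split()
--     return "-".join(parts) if parts else "section"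
-- ===== Notes on version B (the rewrite author's own statement) =====
-- stated objective: idiomatic
-- what changed: Replaces the explicit run-accumulator state machine (parts/current lists with manual flushes) by mapping every non-alphanumeric character to a space and letting str.split() extract the runs in one call.
import Mathlib
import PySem

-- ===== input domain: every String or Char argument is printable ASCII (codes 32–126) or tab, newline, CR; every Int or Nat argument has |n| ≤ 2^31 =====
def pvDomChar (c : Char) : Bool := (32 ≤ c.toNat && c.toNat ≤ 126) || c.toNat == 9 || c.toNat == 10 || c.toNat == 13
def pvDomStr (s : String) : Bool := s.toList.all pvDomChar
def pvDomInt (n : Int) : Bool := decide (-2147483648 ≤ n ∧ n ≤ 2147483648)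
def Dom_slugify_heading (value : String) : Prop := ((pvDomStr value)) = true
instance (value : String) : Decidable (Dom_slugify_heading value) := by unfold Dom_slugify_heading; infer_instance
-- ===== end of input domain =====

-- B replaces A's explicit run-accumulator state machine by mapping non-alphanumerics to spaces and using str.split(); objective: idiomatic.

-- ===== PORT A =====
-- one loop step of A: ch alnum → extend current; else flush current (if nonempty) into parts
def slugifyStep (st : List (List Char) × List Char) (ch : Char) : List (List Char) × List Char :=
  if PySem.Chars.isalnum ch then (st.1, st.2 ++ [ch])
  else if !st.2.isEmpty then (st.1 ++ [st.2], []) else st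

def slugify_heading (value : String) : String :=
  let st := (PySem.Str.lower value).toList.foldl slugifyStep ([], [])
  let parts := if !st.2.isEmpty then st.1 ++ [st.2] else st.1
  if !parts.isEmpty then PySem.Str.join "-" (parts.map String.ofList) else "section"

-- ===== PORT B =====
def slugify_heading_alt (value : String) : String :=
  let s := String.ofList ((PySem.Str.lower value).toList.map
    (fun ch => if PySem.Chars.isalnum ch then ch else ' '))
  let parts := PySem.Str.split₀ s
  if !parts.isEmpty then PySem.Str.join "-" parts else "section"

-- ===== PRECONDITION & SPEC =====
def Spec_slugify_heading (value : String) (out : String) : Prop := out = slugify_heading_alt value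
instance (value : String) (out : String) : Decidable (Spec_slugify_heading value out) := by unfold Spec_slugify_heading; infer_instance

-- ===== CLAIM (what is proved, stated in full; the proofs are below) =====
def Claim_equal_slugify_heading : Prop := ∀ (value : String), Dom_slugify_heading value → Spec_slugify_heading value (slugify_heading value)

-- ===== LEMMAS AND PROOFS =====

lemma isspace_of_isalnum (c : Char) (h : PySem.Chars.isalnum c = true) :
    PySem.Chars.isspace c = false := by
  have h1 : 'A'.val.toNat = 65 := rfl
  have h2 : 'Z'.val.toNat = 90 := rfl
  have h3 : 'a'.val.toNat = 97 := rfl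
  have h4 : 'z'.val.toNat = 122 := rfl
  have h5 : '0'.val.toNat = 48 := rfl
  have h6 : '9'.val.toNat = 57 := rfl
  simp only [PySem.Chars.isalnum, PySem.Chars.isalpha, PySem.Chars.isupper, PySem.Chars.islower,
    PySem.Chars.isdigit, PySem.Chars.isspace, Char.le_def, UInt32.le_iff_toNat_le, Char.toNat,
    Bool.or_eq_true, Bool.and_eq_true, decide_eq_true_eq, Bool.or_eq_false_iff,
    Bool.and_eq_false_iff, decide_eq_false_iff_not, h1, h2, h3, h4, h5, h6] at h ⊢
  omega

-- split₀.go on the space-mapped list computes exactly A's flushed fold state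
lemma go_eq_fold (cs : List Char) : ∀ (parts : List (List Char)) (cur : List Char),
    PySem.Chars.split₀.go
        (cs.map (fun ch => if PySem.Chars.isalnum ch then ch else ' '))
        cur.reverse parts.reverse =
      (let st := cs.foldl slugifyStep (parts, cur);
       if !st.2.isEmpty then st.1 ++ [st.2] else st.1) := by
  induction cs with
  | nil =>
    intro parts cur
    simp only [List.map_nil, List.foldl_nil, PySem.Chars.split₀.go]
    cases cur <;> simp
  | cons c cs ih =>
    intro parts cur
    by_cases hc : PySem.Chars.isalnum c = true
    · have hsp := isspace_of_isalnum c hc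
      simp only [List.map_cons, hc, PySem.Chars.split₀.go, hsp, Bool.false_eq_true,
        if_false, List.foldl_cons, slugifyStep, ite_true]
      have : c :: cur.reverse = (cur ++ [c]).reverse := by simp
      rw [this, ih]
    · have hc' : PySem.Chars.isalnum c = false := by simpa using hc
      have hsp : PySem.Chars.isspace ' ' = true := by decide
      simp only [List.map_cons, hc', Bool.false_eq_true, if_false, PySem.Chars.split₀.go, hsp,
        ite_true, List.foldl_cons, slugifyStep]
      cases cur with
      | nil => simpa using ih parts []
      | cons a as =>
        have hne : ((a :: as).reverse).isEmpty = false := by simp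
        simp only [hne, Bool.false_eq_true, if_false, List.reverse_reverse, List.isEmpty_cons,
          Bool.not_false, ite_true]
        have : (a :: as) :: parts.reverse = (parts ++ [a :: as]).reverse := by simp
        rw [this]
        have := ih (parts ++ [a :: as]) []
        simpa using this

-- ===== VERDICT (by name: the statement is the Claim_ definition above) =====
theorem slugify_heading_spec : Claim_equal_slugify_heading := by
  intro value _
  unfold Spec_slugify_heading slugify_heading slugify_heading_alt
  simp only [PySem.Str.split₀]
  have h := go_eq_fold (PySem.Str.lower value).toList [] []
  simp only [List.reverse_nil] at h
  rw [String.toList_ofList, PySem.Chars.split₀, h]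
  cases hst : (PySem.Str.lower value).toList.foldl slugifyStep ([], []) with
  | mk p c =>
    simp only
    split_ifs <;> simp_all [PySem.Str.join, List.map_eq_nil_iff]
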